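-- pv_equiv track=rewrite | github.com/eronekogin/leetcode | 2024/maximum_score_of_spliced_array.py | maximums_spliced_array
-- ===== SOURCE A (Python) =====
-- def maximums_spliced_array(nums1: list[int], nums2: list[int]) -> int:
--     """
--     maximums spliced array
--     """
--     def kadane(a: list[int], b: list[int]):
--         rslt = curr = 0
--         tb = 0
--
--         for x, y in zip(a, b):
--             curr = max(0, curr + x - y)
--             rslt = max(rslt, curr)
--             tb += y
--
--         return rslt + tb
--
--     return max(kadane(nums1, nums2), kadane(nums2, nums1))
-- ===== SOURCE B (Python) =====
-- def maximums_spliced_array(nums1: list[int], nums2: list[int]) -> int: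
--     """
--     maximums spliced array
--     """
--     # Single pass over the paired difference stream: prefix sums with running
--     # min and max prefix give the best gains for BOTH swap directions at once;
--     # sum(nums1 part) is recovered as s2 + pfx, so no second directional pass.
--     pfx = mn = mx = g1 = g2 = s2 = 0
--     for x, y in zip(nums1, nums2):
--         pfx += x - y
--         g1 = max(g1, pfx - mn)
--         g2 = max(g2, mx - pfx)
--         mn = min(mn, pfx)
--         mx = max(mx, pfx)
--         s2 += y
--     return max(s2 + g1, s2 + pfx + g2)
-- ===== Notes on version B (the rewrite author's own statement) =====
-- stated objective: alternative
-- what changed: Replaces A's two directional Kadane passes by a single pass over the paired difference stream: prefix sums with a running minimum and maximum prefix give the best swap gain for both directions at once, and sum(nums1 part) is recovered as s2 + pfx, so the whole second directional scan disappears.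
import Mathlib
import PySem

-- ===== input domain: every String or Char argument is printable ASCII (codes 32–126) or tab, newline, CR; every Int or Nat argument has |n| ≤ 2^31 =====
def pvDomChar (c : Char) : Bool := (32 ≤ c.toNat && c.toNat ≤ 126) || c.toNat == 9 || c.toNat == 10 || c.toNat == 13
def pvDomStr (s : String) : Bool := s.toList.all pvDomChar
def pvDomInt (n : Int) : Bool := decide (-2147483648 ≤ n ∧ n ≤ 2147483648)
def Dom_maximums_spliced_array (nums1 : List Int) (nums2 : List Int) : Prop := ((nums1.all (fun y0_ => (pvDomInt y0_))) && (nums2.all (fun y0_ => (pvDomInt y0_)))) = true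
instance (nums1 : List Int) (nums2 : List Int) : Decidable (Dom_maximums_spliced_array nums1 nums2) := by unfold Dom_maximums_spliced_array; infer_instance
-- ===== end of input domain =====

-- B replaces A's two directional Kadane passes by ONE prefix-sum pass computing both swap gains (alternative decomposition, same cost).

-- ===== PORT A =====
-- A: two calls of kadane, each a clamped running-sum scan over its own zipped stream plus the sum of its second list.
def kadaneGo : List (Int × Int) → Int → Int → Int → Int
  | [], rslt, _curr, tb => rslt + tb
  | (x, y) :: rest, rslt, curr, tb =>
      let c := max 0 (curr + x - y)
      kadaneGo rest (max rslt c) c (tb + y)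

def kadane (a : List Int) (b : List Int) : Int := kadaneGo (a.zip b) 0 0 0

def maximums_spliced_array (nums1 : List Int) (nums2 : List Int) : Int :=
  max (kadane nums1 nums2) (kadane nums2 nums1)

-- ===== PORT B =====
-- B: a single pass over the zipped stream; prefix sums with running min and max prefix yield both directions' gains at once.
def spliceGo : List (Int × Int) → Int → Int → Int → Int → Int → Int → Int
  | [], pfx, _mn, _mx, g1, g2, s2 => max (s2 + g1) (s2 + pfx + g2)
  | (x, y) :: rest, pfx, mn, mx, g1, g2, s2 =>
      let p := pfx + (x - y)
      spliceGo rest p (min mn p) (max mx p) (max g1 (p - mn)) (max g2 (mx - p)) (s2 + y)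

def maximums_spliced_array_alt (nums1 : List Int) (nums2 : List Int) : Int :=
  spliceGo (nums1.zip nums2) 0 0 0 0 0 0

-- ===== PRECONDITION & SPEC =====
def Spec_maximums_spliced_array (nums1 : List Int) (nums2 : List Int) (out : Int) : Prop := out = maximums_spliced_array_alt nums1 nums2
instance (nums1 : List Int) (nums2 : List Int) (out : Int) : Decidable (Spec_maximums_spliced_array nums1 nums2 out) := by unfold Spec_maximums_spliced_array; infer_instance

-- ===== CLAIM (what is proved, stated in full; the proofs are below) =====
def Claim_equal_maximums_spliced_array : Prop := ∀ (nums1 : List Int) (nums2 : List Int), Dom_maximums_spliced_array nums1 nums2 → Spec_maximums_spliced_array nums1 nums2 (maximums_spliced_array nums1 nums2)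

-- ===== LEMMAS AND PROOFS =====
theorem zip_swap_eq (a b : List Int) : b.zip a = (a.zip b).map Prod.swap := by
  induction a generalizing b with
  | nil => cases b <;> rfl
  | cons x xs ih => cases b with
    | nil => rfl
    | cons y ys =>
        simp only [List.zip_cons_cons, List.map_cons, Prod.swap]
        rw [ih ys]

theorem kadaneGo_pair_eq_spliceGo (l : List (Int × Int)) :
    ∀ (r1 c1 t1 r2 c2 t2 pfx mn mx g1 g2 s2 : Int),
    c1 = pfx - mn → r1 = g1 → t1 = s2 →
    c2 = mx - pfx → r2 = g2 → t2 = s2 + pfx →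
    0 ≤ g1 → 0 ≤ g2 →
    max (kadaneGo l r1 c1 t1) (kadaneGo (l.map Prod.swap) r2 c2 t2)
      = spliceGo l pfx mn mx g1 g2 s2 := by
  induction l with
  | nil =>
      intro r1 c1 t1 r2 c2 t2 pfx mn mx g1 g2 s2 h1 h2 h3 h4 h5 h6 h7 h8
      simp only [List.map_nil, kadaneGo, spliceGo]
      omega
  | cons hd tl ih =>
      intro r1 c1 t1 r2 c2 t2 pfx mn mx g1 g2 s2 h1 h2 h3 h4 h5 h6 h7 h8
      obtain ⟨x, y⟩ := hd
      simp only [List.map_cons, Prod.swap, kadaneGo, spliceGo]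
      exact ih _ _ _ _ _ _ _ _ _ _ _ _
        (by omega) (by omega) (by omega) (by omega) (by omega) (by omega)
        (by omega) (by omega)

-- ===== VERDICT (by name: the statement is the Claim_ definition above) =====
theorem maximums_spliced_array_spec : Claim_equal_maximums_spliced_array := by
  intro nums1 nums2 _
  unfold Spec_maximums_spliced_array maximums_spliced_array maximums_spliced_array_alt kadane
  rw [zip_swap_eq nums1 nums2]
  exact kadaneGo_pair_eq_spliceGo _ 0 0 0 0 0 0 0 0 0 0 0 0
    rfl rfl rfl rfl rfl rfl le_rfl le_rfl
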